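-- pv_equiv track=rewrite | github.com/meniwap/telecraftor | src/telecraft/client/peers.py | normalize_username
-- ===== SOURCE A (Python) =====
-- def normalize_username(username: str) -> str:
--     u = username.strip()
--     if not u:
--         return ""
--     if u.startswith("@"):
--         u = u[1:]
--     # Support common link forms:
--     # - https://t.me/<username>
--     # - t.me/<username>
--     # - telegram.me/<username>
--     for host in (
--         "https://t.me/",
--         "http://t.me/",
--         "t.me/",
--         "https://telegram.me/",
--         "http://telegram.me/",
--         "telegram.me/",
--     ):
--         if u.startswith(host):
--             u = u[len(host) :]
--             break
--     # Trim path/query/fragment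
--     u = u.split("?", 1)[0].split("#", 1)[0].split("/", 1)[0]
--     return u.strip().lower()
-- ===== SOURCE B (Python) =====
-- def normalize_username(username: str) -> str:
--     u = username.strip()
--     if u.startswith("@"):
--         u = u[1:]
--     # factor the six host prefixes: optional scheme, then one of two hosts
--     v = u[8:] if u.startswith("https://") else u[7:] if u.startswith("http://") else u
--     if v.startswith("t.me/"):
--         u = v[5:]
--     elif v.startswith("telegram.me/"):
--         u = v[12:]
--     # one character scan replaces the three chained splits
--     name = []
--     for c in u:
--         if c in "?#/":
--             break
--         name.append(c)
--     return "".join(name).strip().lower()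
-- ===== Notes on version B (the rewrite author's own statement) =====
-- stated objective: simpler
-- what changed: B factors the six host prefixes into an optional-scheme strip plus two host checks (no loop over a prefix tuple), replaces the three chained one-shot splits on the query, fragment and path separators by a single character scan that stops at the first such separator, and drops the redundant empty-string guard.
import Mathlib
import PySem

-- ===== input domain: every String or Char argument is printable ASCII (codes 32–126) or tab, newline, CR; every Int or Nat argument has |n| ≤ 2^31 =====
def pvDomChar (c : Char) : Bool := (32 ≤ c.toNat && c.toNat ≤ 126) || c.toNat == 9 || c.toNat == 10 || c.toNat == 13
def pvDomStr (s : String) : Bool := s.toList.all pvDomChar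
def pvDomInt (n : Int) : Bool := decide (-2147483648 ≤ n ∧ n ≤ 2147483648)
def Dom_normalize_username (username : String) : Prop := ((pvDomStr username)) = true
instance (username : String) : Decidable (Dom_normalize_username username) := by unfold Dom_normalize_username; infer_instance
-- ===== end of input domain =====

-- B replaces A's six-host-prefix loop by scheme/host factoring and A's three chained splits by
-- one character scan, and drops the redundant empty-string guard (objective: simpler).

-- ===== PORT A =====
-- the tuple of host prefixes, in A's order
def pvHostsA : List (List Char) :=
  ["https://t.me/".toList, "http://t.me/".toList, "t.me/".toList,
   "https://telegram.me/".toList, "http://telegram.me/".toList, "telegram.me/".toList]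

-- A's 'for host in (…): if u.startswith(host): u = u[len(host):]; break'
def pvHostLoopA : List (List Char) → List Char → List Char
  | [], u => u
  | h :: hs, u =>
    if PySem.Chars.startswith u h then PySem.List.slice u (some (h.length : Int)) none
    else pvHostLoopA hs u

def normalize_username (username : String) : String :=
  let u := PySem.Chars.strip username.toList
  if u = [] then ""   -- 'if not u: return ""'
  else
    let u := if PySem.Chars.startswith u ['@'] then PySem.List.slice u (some 1) none else u
    let u := pvHostLoopA pvHostsA u
    -- u.split("?", 1)[0].split("#", 1)[0].split("/", 1)[0]  ([0] never raises: split is nonempty)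
    let u := (PySem.Chars.splitOnMax u ['?'] 1).headD []
    let u := (PySem.Chars.splitOnMax u ['#'] 1).headD []
    let u := (PySem.Chars.splitOnMax u ['/'] 1).headD []
    String.ofList (PySem.Chars.lower (PySem.Chars.strip u))

-- ===== PORT B =====
-- B's 'for c in u: if c in "?#/": break; name.append(c)'
def pvScanLoopB : List Char → List Char → List Char
  | [], name => name
  | c :: rest, name =>
    if PySem.Chars.isIn [c] "?#/".toList then name else pvScanLoopB rest (name ++ [c])

def normalize_username_alt (username : String) : String :=
  let u := PySem.Chars.strip username.toList
  let u := if PySem.Chars.startswith u ['@'] then PySem.List.slice u (some 1) none else u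
  let v := if PySem.Chars.startswith u "https://".toList then PySem.List.slice u (some 8) none
           else if PySem.Chars.startswith u "http://".toList then PySem.List.slice u (some 7) none
           else u
  let u := if PySem.Chars.startswith v "t.me/".toList then PySem.List.slice v (some 5) none
           else if PySem.Chars.startswith v "telegram.me/".toList then PySem.List.slice v (some 12) none
           else u
  let name := pvScanLoopB u []
  -- '"".join(name)' on the accumulated single-character strings
  String.ofList (PySem.Chars.lower (PySem.Chars.strip (PySem.Chars.join [] (name.map (fun c => [c])))))

-- ===== PRECONDITION & SPEC =====
def Spec_normalize_username (username : String) (out : String) : Prop := out = normalize_username_alt username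
instance (username : String) (out : String) : Decidable (Spec_normalize_username username out) := by unfold Spec_normalize_username; infer_instance

-- ===== CLAIM (what is proved, stated in full; the proofs are below) =====
def Claim_equal_normalize_username : Prop := ∀ (username : String), Dom_normalize_username username → Spec_normalize_username username (normalize_username username)

-- ===== LEMMAS AND PROOFS =====

theorem pvScan_eq (u name : List Char) :
    pvScanLoopB u name = name ++ u.takeWhile (fun c => !PySem.Chars.isIn [c] "?#/".toList) := by
  induction u generalizing name with
  | nil => simp [pvScanLoopB]
  | cons c rest ih =>
    have e : "?#/".toList = ['?', '#', '/'] := rfl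
    simp only [pvScanLoopB, List.takeWhile, e]
    by_cases h : PySem.Chars.isIn [c] ['?', '#', '/'] = true
    · rw [if_pos h]
      have : (!PySem.Chars.isIn [c] ['?', '#', '/']) = false := by simp [h]
      simp only [this]
      simp
    · rw [if_neg h]
      
      have : (!PySem.Chars.isIn [c] ['?', '#', '/']) = true := by simp [h]
      simp only [this, ih]
      simp
theorem go_zero (sep : List Char) (fuel : Nat) (l cur : List Char) (acc : List (List Char)) :
    PySem.Chars.splitOnMax.go sep fuel 0 l cur acc = ((cur.reverse ++ l) :: acc).reverse := by
  cases fuel with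
  | zero => simp [PySem.Chars.splitOnMax.go]
  | succ n => cases l <;> simp [PySem.Chars.splitOnMax.go]

theorem go_one (ch : Char) (fuel : Nat) (u cur : List Char) (h : u.length < fuel) :
    (PySem.Chars.splitOnMax.go [ch] fuel 1 u cur []).headD [] =
      cur.reverse ++ u.takeWhile (fun c => c != ch) := by
  induction fuel generalizing u cur with
  | zero => omega
  | succ n ih =>
    cases u with
    | nil => simp [PySem.Chars.splitOnMax.go]
    | cons c rest =>
      simp only [PySem.Chars.splitOnMax.go]
      by_cases hc : c = ch
      · subst hc
        simp [List.isPrefixOf, go_zero, List.takeWhile]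
      · have hpre : [ch].isPrefixOf (c :: rest) = false := by
          simp [List.isPrefixOf]
          exact fun hh => hc hh.symm
        rw [if_neg (by simp), if_neg (by simp [hpre])]
        have hcb : (c != ch) = true := by simp [hc]
        simp only [List.takeWhile, hcb]
        have := ih rest (c :: cur) (by simp at h; omega)
        simpa using this

theorem pvSplitHead (ch : Char) (u : List Char) :
    (PySem.Chars.splitOnMax u [ch] 1).headD [] = u.takeWhile (fun c => c != ch) := by
  have : ¬ ((1:Int) < 0) := by norm_num
  simp only [PySem.Chars.splitOnMax, if_neg this]
  simpa using go_one ch (u.length + 1) u [] (by omega)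

theorem pvChop {a b u : List Char} (h : a <+: u) : ((a ++ b) <+: u) ↔ b <+: u.drop a.length := by
  obtain ⟨t, rfl⟩ := h
  rw [List.drop_left]
  exact List.prefix_append_right_inj a

theorem pvNoBoth {p q : List Char} (h1 : ¬ p <+: q) (h2 : ¬ q <+: p) {u : List Char}
    (hp : p <+: u) : ¬ q <+: u :=
  fun hq => (List.prefix_or_prefix_of_prefix hp hq).elim h1 h2

theorem pvNoPreExt {a b u : List Char} (h : ¬ a <+: u) : ¬ (a ++ b) <+: u :=
  fun hp => h ((List.prefix_append a b).trans hp)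

theorem pvSlice (w : List Char) (a : Int) (h : 0 ≤ a) :
    PySem.List.slice w (some a) none = w.drop a.toNat :=
  PySem.List.slice_from w h

theorem pvHost_eq (u : List Char) :
    pvHostLoopA pvHostsA u =
      (let v := if PySem.Chars.startswith u "https://".toList then PySem.List.slice u (some 8) none
                else if PySem.Chars.startswith u "http://".toList then PySem.List.slice u (some 7) none
                else u
       if PySem.Chars.startswith v "t.me/".toList then PySem.List.slice v (some 5) none
       else if PySem.Chars.startswith v "telegram.me/".toList then PySem.List.slice v (some 12) none
       else u) := by
  simp only [pvHostsA, pvHostLoopA]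
  simp only [PySem.Chars.startswith_iff]
  by_cases h8 : ['h', 't', 't', 'p', 's', ':', '/', '/'] <+: u
  · have n7 : ¬ ['h', 't', 't', 'p', ':', '/', '/'] <+: u := pvNoBoth (by decide) (by decide) h8
    have nT : ¬ ['t', '.', 'm', 'e', '/'] <+: u := pvNoBoth (by decide) (by decide) h8
    have nG : ¬ ['t', 'e', 'l', 'e', 'g', 'r', 'a', 'm', '.', 'm', 'e', '/'] <+: u := pvNoBoth (by decide) (by decide) h8
    have hT : (['h', 't', 't', 'p', 's', ':', '/', '/', 't', '.', 'm', 'e', '/'] <+: u) ↔ ['t', '.', 'm', 'e', '/'] <+: u.drop 8 := pvChop (a := ['h', 't', 't', 'p', 's', ':', '/', '/']) (b := ['t', '.', 'm', 'e', '/']) h8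
    have hG : (['h', 't', 't', 'p', 's', ':', '/', '/', 't', 'e', 'l', 'e', 'g', 'r', 'a', 'm', '.', 'm', 'e', '/'] <+: u) ↔ ['t', 'e', 'l', 'e', 'g', 'r', 'a', 'm', '.', 'm', 'e', '/'] <+: u.drop 8 := pvChop (a := ['h', 't', 't', 'p', 's', ':', '/', '/']) (b := ['t', 'e', 'l', 'e', 'g', 'r', 'a', 'm', '.', 'm', 'e', '/']) h8
    have n7T : ¬ ['h', 't', 't', 'p', ':', '/', '/', 't', '.', 'm', 'e', '/'] <+: u := pvNoPreExt (a := ['h', 't', 't', 'p', ':', '/', '/']) (b := ['t', '.', 'm', 'e', '/']) n7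
    have n7G : ¬ ['h', 't', 't', 'p', ':', '/', '/', 't', 'e', 'l', 'e', 'g', 'r', 'a', 'm', '.', 'm', 'e', '/'] <+: u := pvNoPreExt (a := ['h', 't', 't', 'p', ':', '/', '/']) (b := ['t', 'e', 'l', 'e', 'g', 'r', 'a', 'm', '.', 'm', 'e', '/']) n7
    by_cases hTd : ['t', '.', 'm', 'e', '/'] <+: u.drop 8
    · simp [h8, hT, hTd, n7T, pvSlice u 13 (by norm_num), pvSlice u 8 (by norm_num), pvSlice (u.drop 8) 5 (by norm_num),
        List.drop_drop]
    · by_cases hGd : ['t', 'e', 'l', 'e', 'g', 'r', 'a', 'm', '.', 'm', 'e', '/'] <+: u.drop 8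
      · simp [h8, hT, hTd, hG, hGd, nT, n7T, pvSlice u 20 (by norm_num), pvSlice u 8 (by norm_num),
          pvSlice (u.drop 8) 12 (by norm_num), List.drop_drop]
      · simp [h8, hT, hTd, hG, hGd, nT, nG, n7T, n7G, pvSlice u 8 (by norm_num)]
  · by_cases h7 : ['h', 't', 't', 'p', ':', '/', '/'] <+: u
    · have nT : ¬ ['t', '.', 'm', 'e', '/'] <+: u := pvNoBoth (by decide) (by decide) h7
      have nG : ¬ ['t', 'e', 'l', 'e', 'g', 'r', 'a', 'm', '.', 'm', 'e', '/'] <+: u := pvNoBoth (by decide) (by decide) h7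
      have hT : (['h', 't', 't', 'p', ':', '/', '/', 't', '.', 'm', 'e', '/'] <+: u) ↔ ['t', '.', 'm', 'e', '/'] <+: u.drop 7 := pvChop (a := ['h', 't', 't', 'p', ':', '/', '/']) (b := ['t', '.', 'm', 'e', '/']) h7
      have hG : (['h', 't', 't', 'p', ':', '/', '/', 't', 'e', 'l', 'e', 'g', 'r', 'a', 'm', '.', 'm', 'e', '/'] <+: u) ↔ ['t', 'e', 'l', 'e', 'g', 'r', 'a', 'm', '.', 'm', 'e', '/'] <+: u.drop 7 := pvChop (a := ['h', 't', 't', 'p', ':', '/', '/']) (b := ['t', 'e', 'l', 'e', 'g', 'r', 'a', 'm', '.', 'm', 'e', '/']) h7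
      have n8T : ¬ ['h', 't', 't', 'p', 's', ':', '/', '/', 't', '.', 'm', 'e', '/'] <+: u := pvNoPreExt (a := ['h', 't', 't', 'p', 's', ':', '/', '/']) (b := ['t', '.', 'm', 'e', '/']) h8
      have n8G : ¬ ['h', 't', 't', 'p', 's', ':', '/', '/', 't', 'e', 'l', 'e', 'g', 'r', 'a', 'm', '.', 'm', 'e', '/'] <+: u := pvNoPreExt (a := ['h', 't', 't', 'p', 's', ':', '/', '/']) (b := ['t', 'e', 'l', 'e', 'g', 'r', 'a', 'm', '.', 'm', 'e', '/']) h8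
      by_cases hTd : ['t', '.', 'm', 'e', '/'] <+: u.drop 7
      · simp [h8, h7, hT, hTd, n8T, pvSlice u 12 (by norm_num), pvSlice u 7 (by norm_num), pvSlice (u.drop 7) 5 (by norm_num),
          List.drop_drop]
      · by_cases hGd : ['t', 'e', 'l', 'e', 'g', 'r', 'a', 'm', '.', 'm', 'e', '/'] <+: u.drop 7
        · simp [h8, h7, hT, hTd, hG, hGd, nT, n8T, n8G, pvSlice u 19 (by norm_num), pvSlice u 7 (by norm_num),
            pvSlice (u.drop 7) 12 (by norm_num), List.drop_drop]
        · simp [h8, h7, hT, hTd, hG, hGd, nT, nG, n8T, n8G, pvSlice u 7 (by norm_num)]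
    · have n8T : ¬ ['h', 't', 't', 'p', 's', ':', '/', '/', 't', '.', 'm', 'e', '/'] <+: u := pvNoPreExt (a := ['h', 't', 't', 'p', 's', ':', '/', '/']) (b := ['t', '.', 'm', 'e', '/']) h8
      have n8G : ¬ ['h', 't', 't', 'p', 's', ':', '/', '/', 't', 'e', 'l', 'e', 'g', 'r', 'a', 'm', '.', 'm', 'e', '/'] <+: u := pvNoPreExt (a := ['h', 't', 't', 'p', 's', ':', '/', '/']) (b := ['t', 'e', 'l', 'e', 'g', 'r', 'a', 'm', '.', 'm', 'e', '/']) h8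
      have n7T : ¬ ['h', 't', 't', 'p', ':', '/', '/', 't', '.', 'm', 'e', '/'] <+: u := pvNoPreExt (a := ['h', 't', 't', 'p', ':', '/', '/']) (b := ['t', '.', 'm', 'e', '/']) h7
      have n7G : ¬ ['h', 't', 't', 'p', ':', '/', '/', 't', 'e', 'l', 'e', 'g', 'r', 'a', 'm', '.', 'm', 'e', '/'] <+: u := pvNoPreExt (a := ['h', 't', 't', 'p', ':', '/', '/']) (b := ['t', 'e', 'l', 'e', 'g', 'r', 'a', 'm', '.', 'm', 'e', '/']) h7
      by_cases hTd : ['t', '.', 'm', 'e', '/'] <+: u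
      · simp [h8, h7, hTd, n8T, n7T, pvSlice u 5 (by norm_num)]
      · by_cases hGd : ['t', 'e', 'l', 'e', 'g', 'r', 'a', 'm', '.', 'm', 'e', '/'] <+: u
        · simp [h8, h7, hTd, hGd, n8T, n7T, n8G, n7G, pvSlice u 12 (by norm_num)]
        · simp [h8, h7, hTd, hGd, n8T, n7T, n8G, n7G]

theorem pvCut_eq (w : List Char) :
    (PySem.Chars.splitOnMax ((PySem.Chars.splitOnMax ((PySem.Chars.splitOnMax w ['?'] 1).headD
        []) ['#'] 1).headD []) ['/'] 1).headD [] =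
      w.takeWhile (fun c => !PySem.Chars.isIn [c] "?#/".toList) := by
  rw [pvSplitHead, pvSplitHead, pvSplitHead, List.takeWhile_takeWhile, List.takeWhile_takeWhile]
  congr 1
  funext c
  by_cases h1 : c = '?'
  · subst h1; decide
  by_cases h2 : c = '#'
  · subst h2; decide
  by_cases h3 : c = '/'
  · subst h3; decide
  have hin : PySem.Chars.isIn [c] ['?', '#', '/'] = false := by
    rw [PySem.Chars.isIn_eq_false_iff]
    simp [List.singleton_infix_iff, h1, h2, h3]
  simp [hin, h1, h2, h3]

-- ===== VERDICT (by name: the statement is the Claim_ definition above) =====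
theorem normalize_username_spec : Claim_equal_normalize_username := by
  intro username _
  unfold Spec_normalize_username
  simp only [normalize_username, normalize_username_alt]
  by_cases h : PySem.Chars.strip username.toList = []
  · rw [if_pos h, h]
    decide
  · rw [if_neg h]
    rw [pvHost_eq, pvScan_eq, PySem.Chars.join_nil_singletons, pvCut_eq]
    rfl
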